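-- pv_equiv track=rewrite | github.com/HunterStevens/cs-sprint-challenge-hash-tables | hashtables/ex4/ex4.py | has_negatives
-- ===== SOURCE A (Python) =====
-- def has_negatives(a):
--     """
--     YOUR CODE HERE
--     """
--     # Your code here
--     result = []
--     cahce_neg = {}
--     cahce_pos = {}
--
--     for i in a:
--         if i < 0:
--             if i in cahce_neg:
--                 pass
--             else:
--                 cahce_neg[i] = -i
--         elif i > 0:
--             if i in cahce_pos:
--                 pass
--             else:
--                 cahce_pos[i] = i
--     for i in cahce_neg:
--         if cahce_neg[i] in cahce_pos:
--             result.append(cahce_neg[i])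
--     return result
-- ===== SOURCE B (Python) =====
-- def has_negatives(a):
--     return [-x for i, x in enumerate(a) if x < 0 and -x in a and a.index(x) == i]
-- ===== Notes on version B (the rewrite author's own statement) =====
-- stated objective: simpler
-- what changed: Drops A's two hash indexes (negative and positive dicts) entirely: a single comprehension over the list that matches each negative by a direct membership test -x in a and deduplicates it with a.index(x) == i (first occurrence), trading O(n) hashing for O(n^2) scans.
import Mathlib
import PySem

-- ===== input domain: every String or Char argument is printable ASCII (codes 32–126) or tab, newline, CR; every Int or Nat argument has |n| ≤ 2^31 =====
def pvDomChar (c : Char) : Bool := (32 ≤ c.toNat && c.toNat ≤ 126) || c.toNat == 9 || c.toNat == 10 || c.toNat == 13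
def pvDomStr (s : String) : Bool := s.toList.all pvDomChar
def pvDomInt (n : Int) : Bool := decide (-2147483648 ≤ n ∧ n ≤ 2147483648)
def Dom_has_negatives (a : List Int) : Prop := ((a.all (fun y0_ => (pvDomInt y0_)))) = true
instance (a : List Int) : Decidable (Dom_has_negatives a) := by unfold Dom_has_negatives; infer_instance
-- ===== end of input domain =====

-- B drops A's two hash indexes: one comprehension over the list, matching each negative
-- by '-x in a' and deduplicating it by 'a.index(x) == i' (first occurrence)
-- (objective: simpler — brute-force scans instead of hash indexes; B is slower; same return value).

-- ===== PORT A =====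
-- literal transliteration of A: one loop filling two insertion-ordered dicts, then a loop
-- over the negative dict's keys.  `cahce_neg[i]` is ported as getD (i is always a key there).
def has_negatives (a : List Int) : List Int :=
  let caches := a.foldl (fun (s : PySem.Dict Int Int × PySem.Dict Int Int) i =>
      if i < 0 then
        (if PySem.Dict.contains s.1 i then s else (PySem.Dict.insert s.1 i (-i), s.2))
      else if i > 0 then
        (if PySem.Dict.contains s.2 i then s else (s.1, PySem.Dict.insert s.2 i i))
      else s)
    (PySem.Dict.empty, PySem.Dict.empty)
  (PySem.Dict.keys caches.1).foldl (fun result i =>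
      if PySem.Dict.contains caches.2 (PySem.Dict.getD caches.1 i 0) then
        result ++ [PySem.Dict.getD caches.1 i 0]
      else result) []

-- ===== PORT B =====
-- literal transliteration of B: the comprehension
--   [-x for i, x in enumerate(a) if x < 0 and -x in a and a.index(x) == i]
-- (a.index(x) only runs under 'x < 0 and -x in a', where x ∈ a, so it never raises)
def has_negatives_alt (a : List Int) : List Int :=
  (PySem.List.enumerate a 0).flatMap (fun ix =>
    if ix.2 < 0 ∧ (-ix.2) ∈ a ∧ (PySem.List.index? a ix.2).map (fun k => (k : Int)) = some ix.1
    then [-ix.2] else [])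

-- ===== PRECONDITION & SPEC =====
def Spec_has_negatives (a : List Int) (out : List Int) : Prop := out = has_negatives_alt a
instance (a : List Int) (out : List Int) : Decidable (Spec_has_negatives a out) := by unfold Spec_has_negatives; infer_instance

-- ===== CLAIM (what is proved, stated in full; the proofs are below) =====
def Claim_equal_has_negatives : Prop := ∀ (a : List Int), Dom_has_negatives a → Spec_has_negatives a (has_negatives a)

-- ===== LEMMAS AND PROOFS =====

-- the "record a negative / a positive first occurrence" set steps
def pvNStep (S : PySem.Set Int) (i : Int) : PySem.Set Int := if i < 0 then PySem.Set.add S i else S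
def pvPStep (S : PySem.Set Int) (i : Int) : PySem.Set Int := if 0 < i then PySem.Set.add S i else S
-- A's two caches, as functions of the key sets
def pvNegD (S : List Int) : PySem.Dict Int Int := PySem.Dict.mk (S.map (fun i => (i, -i)))
def pvPosD (S : List Int) : PySem.Dict Int Int := PySem.Dict.mk (S.map (fun i => (i, i)))

lemma contains_pvNegD (S : List Int) (i : Int) :
    PySem.Dict.contains (pvNegD S) i = PySem.Set.contains S i := by
  simp only [pvNegD, PySem.Dict.contains, PySem.Set.contains, List.any_map, Function.comp_def,
    beq_eq_decide, List.contains_eq_any_beq]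
  apply Bool.eq_iff_iff.mpr
  simp only [List.any_eq_true, decide_eq_true_eq]
  exact ⟨fun ⟨x, hx, h⟩ => ⟨x, hx, h.symm⟩, fun ⟨x, hx, h⟩ => ⟨x, hx, h.symm⟩⟩

lemma contains_pvPosD (S : List Int) (i : Int) :
    PySem.Dict.contains (pvPosD S) i = PySem.Set.contains S i := by
  simp only [pvPosD, PySem.Dict.contains, PySem.Set.contains, List.any_map, Function.comp_def,
    beq_eq_decide, List.contains_eq_any_beq]
  apply Bool.eq_iff_iff.mpr
  simp only [List.any_eq_true, decide_eq_true_eq]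
  exact ⟨fun ⟨x, hx, h⟩ => ⟨x, hx, h.symm⟩, fun ⟨x, hx, h⟩ => ⟨x, hx, h.symm⟩⟩

lemma keys_pvNegD (S : List Int) : PySem.Dict.keys (pvNegD S) = S := by
  simp [pvNegD, PySem.Dict.keys, Function.comp_def]

lemma getD_pvNegD (S : List Int) (i : Int) (h : i ∈ S) : PySem.Dict.getD (pvNegD S) i 0 = -i := by
  induction S with
  | nil => cases h
  | cons j t ih =>
    by_cases hj : j = i
    · subst hj; simp [pvNegD, PySem.Dict.getD, PySem.Dict.get?]
    · have hi : i ∈ t := by cases h with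
        | head => exact absurd rfl hj
        | tail _ h' => exact h'
      have := ih hi
      simpa [pvNegD, PySem.Dict.getD, PySem.Dict.get?, List.find?, hj] using this

lemma insert_pvNegD (S : List Int) (i : Int) (h : PySem.Set.contains S i = false) :
    PySem.Dict.insert (pvNegD S) i (-i) = pvNegD (S ++ [i]) := by
  rw [PySem.Dict.insert]
  rw [show PySem.Dict.contains (pvNegD S) i = false from (contains_pvNegD S i).trans h]
  simp [pvNegD]

lemma insert_pvPosD (S : List Int) (i : Int) (h : PySem.Set.contains S i = false) :
    PySem.Dict.insert (pvPosD S) i i = pvPosD (S ++ [i]) := by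
  rw [PySem.Dict.insert]
  rw [show PySem.Dict.contains (pvPosD S) i = false from (contains_pvPosD S i).trans h]
  simp [pvPosD]

lemma scontains_eq (S : List Int) (x : Int) :
    PySem.Set.contains S x = decide (x ∈ S) := by
  simp [PySem.Set.contains]

lemma add_of_contains (S : PySem.Set Int) (x : Int) (hc : PySem.Set.contains S x = true) :
    PySem.Set.add S x = S := by
  rw [PySem.Set.add, if_pos hc]

lemma add_of_not_contains (S : PySem.Set Int) (x : Int) (hc : PySem.Set.contains S x = false) :
    PySem.Set.add S x = S ++ [x] := by
  rw [PySem.Set.add, if_neg (by rw [hc]; exact Bool.false_ne_true)]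

-- A's first loop over the pair of dicts is the pair of set folds
lemma foldA (a : List Int) : ∀ S P : List Int,
    a.foldl (fun (s : PySem.Dict Int Int × PySem.Dict Int Int) i =>
      if i < 0 then
        (if PySem.Dict.contains s.1 i then s else (PySem.Dict.insert s.1 i (-i), s.2))
      else if i > 0 then
        (if PySem.Dict.contains s.2 i then s else (s.1, PySem.Dict.insert s.2 i i))
      else s) (pvNegD S, pvPosD P)
    = (pvNegD (a.foldl pvNStep S), pvPosD (a.foldl pvPStep P)) := by
  induction a with
  | nil => intro S P; rfl
  | cons x a ih =>
    intro S P
    simp only [List.foldl_cons]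
    by_cases hx : x < 0
    · have hnx : ¬ x > 0 := by omega
      have hP0 : pvPStep P x = P := by rw [pvPStep, if_neg hnx]
      by_cases hc : PySem.Set.contains S x
      · have h1 : pvNStep S x = S := by rw [pvNStep, if_pos hx, add_of_contains S x hc]
        simp only [if_pos hx, contains_pvNegD, hc, if_true]
        rw [h1, hP0]
        exact ih S P
      · have hc' : PySem.Set.contains S x = false := by simpa using hc
        have h1 : pvNStep S x = S ++ [x] := by
          rw [pvNStep, if_pos hx, add_of_not_contains S x hc']
        simp only [if_pos hx, contains_pvNegD, hc', Bool.false_eq_true, if_false,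
          insert_pvNegD S x hc']
        rw [h1, hP0]
        exact ih (S ++ [x]) P
    · have hN0 : pvNStep S x = S := by rw [pvNStep, if_neg hx]
      by_cases hp : x > 0
      · by_cases hc : PySem.Set.contains P x
        · have h2 : pvPStep P x = P := by rw [pvPStep, if_pos hp, add_of_contains P x hc]
          simp only [if_neg hx, if_pos hp, contains_pvPosD, hc, if_true]
          rw [hN0, h2]
          exact ih S P
        · have hc' : PySem.Set.contains P x = false := by simpa using hc
          have h2 : pvPStep P x = P ++ [x] := by
            rw [pvPStep, if_pos hp, add_of_not_contains P x hc']
          simp only [if_neg hx, if_pos hp, contains_pvPosD, hc', Bool.false_eq_true, if_false,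
            insert_pvPosD P x hc']
          rw [hN0, h2]
          exact ih S (P ++ [x])
      · have h2 : pvPStep P x = P := by rw [pvPStep, if_neg hp]
        simp only [if_neg hx, if_neg hp]
        rw [hN0, h2]
        exact ih S P

-- membership characterisations of the two set folds
lemma mem_nfold (a : List Int) : ∀ (S : List Int) (y : Int),
    y ∈ a.foldl pvNStep S ↔ y ∈ S ∨ (y < 0 ∧ y ∈ a) := by
  induction a with
  | nil => intro S y; simp
  | cons x t ih =>
    intro S y
    simp only [List.foldl_cons]
    rw [ih]
    have hstep : y ∈ pvNStep S x ↔ y ∈ S ∨ (x < 0 ∧ y = x) := by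
      rw [pvNStep]
      by_cases hx : x < 0
      · rw [if_pos hx, PySem.Set.add]
        by_cases hc : PySem.Set.contains S x
        · have hm : x ∈ S := by simpa [scontains_eq] using hc
          simp only [if_pos hc]
          constructor
          · exact fun h => Or.inl h
          · rintro (h | ⟨_, rfl⟩) <;> [exact h; exact hm]
        · simp only [if_neg hc, List.mem_append, List.mem_singleton]
          tauto
      · rw [if_neg hx]; tauto
    rw [hstep]
    simp only [List.mem_cons]
    constructor
    · rintro ((h | ⟨hx, rfl⟩) | ⟨hy, hm⟩)
      · exact Or.inl h
      · exact Or.inr ⟨hx, Or.inl rfl⟩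
      · exact Or.inr ⟨hy, Or.inr hm⟩
    · rintro (h | ⟨hy, (rfl | hm)⟩)
      · exact Or.inl (Or.inl h)
      · exact Or.inl (Or.inr ⟨hy, rfl⟩)
      · exact Or.inr ⟨hy, hm⟩

lemma mem_pfold (a : List Int) : ∀ (S : List Int) (y : Int),
    y ∈ a.foldl pvPStep S ↔ y ∈ S ∨ (0 < y ∧ y ∈ a) := by
  induction a with
  | nil => intro S y; simp
  | cons x t ih =>
    intro S y
    simp only [List.foldl_cons]
    rw [ih]
    have hstep : y ∈ pvPStep S x ↔ y ∈ S ∨ (0 < x ∧ y = x) := by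
      rw [pvPStep]
      by_cases hx : 0 < x
      · rw [if_pos hx, PySem.Set.add]
        by_cases hc : PySem.Set.contains S x
        · have hm : x ∈ S := by simpa [scontains_eq] using hc
          simp only [if_pos hc]
          constructor
          · exact fun h => Or.inl h
          · rintro (h | ⟨_, rfl⟩) <;> [exact h; exact hm]
        · simp only [if_neg hc, List.mem_append, List.mem_singleton]
          tauto
      · rw [if_neg hx]; tauto
    rw [hstep]
    simp only [List.mem_cons]
    constructor
    · rintro ((h | ⟨hx, rfl⟩) | ⟨hy, hm⟩)
      · exact Or.inl h
      · exact Or.inr ⟨hx, Or.inl rfl⟩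
      · exact Or.inr ⟨hy, Or.inr hm⟩
    · rintro (h | ⟨hy, (rfl | hm)⟩)
      · exact Or.inl (Or.inl h)
      · exact Or.inl (Or.inr ⟨hy, rfl⟩)
      · exact Or.inr ⟨hy, hm⟩

-- the negative set fold only appends
lemma nfold_prefix (a : List Int) : ∀ S : List Int, ∃ t, a.foldl pvNStep S = S ++ t := by
  induction a with
  | nil => intro S; exact ⟨[], by simp⟩
  | cons x a ih =>
    intro S
    simp only [List.foldl_cons]
    obtain ⟨t, ht⟩ := ih (pvNStep S x)
    by_cases hx : x < 0
    · by_cases hc : PySem.Set.contains S x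
      · refine ⟨t, ?_⟩
        rw [ht, pvNStep, if_pos hx, add_of_contains S x hc]
      · refine ⟨x :: t, ?_⟩
        have hc' : PySem.Set.contains S x = false := by simpa using hc
        rw [ht, pvNStep, if_pos hx, add_of_not_contains S x hc', List.append_assoc]
        rfl
    · exact ⟨t, by rw [ht, pvNStep, if_neg hx]⟩

-- B's comprehension, generalised over a split of the source list
lemma foldB (a : List Int) (rest : List Int) : ∀ (pre : List Int), pre ++ rest = a →
    (PySem.List.enumerate rest (pre.length : Int)).flatMap (fun ix =>
        if ix.2 < 0 ∧ (-ix.2) ∈ a ∧ (PySem.List.index? a ix.2).map (fun k => (k : Int)) = some ix.1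
        then [-ix.2] else [])
    = (((rest.foldl pvNStep (List.foldl pvNStep [] pre)).drop
          (List.foldl pvNStep [] pre).length).filter
        (fun i => decide ((-i) ∈ a))).map (fun i => -i) := by
  induction rest with
  | nil => intro pre _; simp [PySem.List.enumerate, List.drop_length]
  | cons x t ih =>
    intro pre ha
    set S := List.foldl pvNStep [] pre with hS
    have hpre' : (pre ++ [x]) ++ t = a := by rw [← ha, List.append_assoc]; rfl
    have hS' : List.foldl pvNStep [] (pre ++ [x]) = pvNStep S x := by
      rw [List.foldl_append]; rfl
    have hcast : ((pre ++ [x]).length : Int) = (pre.length : Int) + 1 := by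
      simp
    simp only [PySem.List.enumerate_cons, List.flatMap_cons]
    by_cases hx : x < 0
    · by_cases hm : x ∈ pre
      · -- duplicate negative: a.index(x) points strictly before pre.length, so B skips it
        have hcS : PySem.Set.contains S x = true := by
          rw [scontains_eq]; simp [hS, mem_nfold, hx, hm]
        have hidx0 : PySem.List.index? a x = PySem.List.index? pre x := by
          rw [← ha]; exact PySem.List.index?_append_of_mem _ hm
        obtain ⟨k, hk⟩ : ∃ k, PySem.List.index? pre x = some k := by
          have := (PySem.List.index?_isSome_iff (xs := pre) (v := x)).mpr hm
          exact Option.isSome_iff_exists.mp this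
        obtain ⟨p1, s1, hpeq, hlen, -⟩ := (PySem.List.index?_eq_some_iff pre x k).mp hk
        have hklt : k < pre.length := by rw [hpeq, ← hlen]; simp
        have hif : (if x < 0 ∧ (-x) ∈ a ∧
              (PySem.List.index? a x).map (fun k => (k : Int)) = some (pre.length : Int)
            then [-x] else []) = [] := by
          rw [if_neg]
          rintro ⟨-, -, h3⟩
          rw [hidx0, hk] at h3
          simp at h3
          omega
        have hstep : pvNStep S x = S := by rw [pvNStep, if_pos hx, add_of_contains S x hcS]
        have := ih (pre ++ [x]) hpre'
        rw [hS', hstep] at this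
        rw [hif, List.nil_append, ← hcast, this, List.foldl_cons, hstep]
      · -- first occurrence of a negative: a.index(x) == i holds
        have hcS : PySem.Set.contains S x = false := by
          rw [scontains_eq]; simp [hS, mem_nfold, hm]
        have hstep : pvNStep S x = S ++ [x] := by
          rw [pvNStep, if_pos hx, add_of_not_contains S x hcS]
        have hidx : PySem.List.index? a x = some pre.length :=
          (PySem.List.index?_eq_some_iff a x pre.length).mpr ⟨pre, t, ha.symm, rfl, hm⟩
        obtain ⟨t', ht'⟩ := nfold_prefix t (S ++ [x])
        have hIH := ih (pre ++ [x]) hpre'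
        rw [hS', hstep, ht'] at hIH
        rw [List.drop_left] at hIH
        have hd1 : ((S ++ [x]) ++ t').drop S.length = x :: t' := by
          rw [List.append_assoc]; exact List.drop_left
        rw [show List.foldl pvNStep S (x :: t) = (S ++ [x]) ++ t' by
              rw [List.foldl_cons, hstep, ht'],
          hd1, List.filter_cons, ← hcast, hIH]
        by_cases hmm : (-x) ∈ a
        · rw [if_pos ⟨hx, hmm, by rw [hidx]; rfl⟩, if_pos (by simpa using hmm), List.map_cons]
          rfl
        · rw [if_neg (by tauto), if_neg (by simpa using hmm)]
          rfl
    · -- nonnegative element: skipped by B, and no change to S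
      have hif : (if x < 0 ∧ (-x) ∈ a ∧
            (PySem.List.index? a x).map (fun k => (k : Int)) = some (pre.length : Int)
          then [-x] else []) = [] := by rw [if_neg]; tauto
      have hstep : pvNStep S x = S := by rw [pvNStep, if_neg hx]
      have := ih (pre ++ [x]) hpre'
      rw [hS', hstep] at this
      rw [hif, List.nil_append, ← hcast, this, List.foldl_cons, hstep]

lemma main_eq (a : List Int) : has_negatives a = has_negatives_alt a := by
  have hA := foldA a [] []
  have hNP : (pvNegD [], pvPosD []) = ((PySem.Dict.empty : PySem.Dict Int Int),
      (PySem.Dict.empty : PySem.Dict Int Int)) := rfl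
  rw [hNP] at hA
  set N := List.foldl pvNStep [] a with hN
  set P := List.foldl pvPStep [] a with hP
  -- A's value
  have hAval : has_negatives a
      = N.foldl (fun result i =>
          if PySem.Dict.contains (pvPosD P) (PySem.Dict.getD (pvNegD N) i 0) then
            result ++ [PySem.Dict.getD (pvNegD N) i 0]
          else result) [] := by
    simp only [has_negatives]
    rw [hA, keys_pvNegD]
  have hAval2 : has_negatives a
      = (N.filter (fun i => PySem.Set.contains P (-i))).map (fun i => -i) := by
    have hcong := PySem.List.foldl_congr_mem
      (l := N) (init := ([] : List Int))
      (f := fun result i =>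
        if PySem.Dict.contains (pvPosD P) (PySem.Dict.getD (pvNegD N) i 0) then
          result ++ [PySem.Dict.getD (pvNegD N) i 0]
        else result)
      (g := fun result i => if PySem.Set.contains P (-i) then result ++ [-i] else result)
      (by intro acc i hi
          simp only [getD_pvNegD N i hi, contains_pvPosD])
    rw [hAval, hcong,
      PySem.List.foldl_append_if (p := fun i => PySem.Set.contains P (-i)) (f := fun i => -i)]
    simp
  -- the positive-dict membership test equals B's '-x in a' on every element of N
  have hfilter : N.filter (fun i => PySem.Set.contains P (-i))
      = N.filter (fun i => decide ((-i) ∈ a)) := by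
    apply List.filter_congr
    intro i hi
    have hneg : i < 0 := ((mem_nfold a [] i).mp (hN ▸ hi)).resolve_left (by simp)|>.1
    rw [scontains_eq]
    by_cases hmm : (-i) ∈ a
    · have : (-i) ∈ P := by rw [hP, mem_pfold]; exact Or.inr ⟨by omega, hmm⟩
      simp [this, hmm]
    · have : (-i) ∉ P := by rw [hP, mem_pfold]; simp [hmm]
      simp [this, hmm]
  -- B's value
  have hBval : has_negatives_alt a
      = ((N.drop 0).filter (fun i => decide ((-i) ∈ a))).map (fun i => -i) := by
    have := foldB a a [] rfl
    simp only [List.length_nil, Nat.cast_zero, List.foldl_nil] at this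
    simpa [has_negatives_alt] using this
  rw [hAval2, hfilter, hBval, List.drop_zero]

-- ===== VERDICT (by name: the statement is the Claim_ definition above) =====
theorem has_negatives_spec : Claim_equal_has_negatives := by
  intro a _
  unfold Spec_has_negatives
  exact main_eq a
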